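-- pv_equiv track=rewrite | github.com/miliar/Code_Jam_Webscraper | solutions_python/Problem_178/2735.py | fufu
-- ===== SOURCE A (Python) =====
-- def fufu(n):
-- 	count  = 0
-- 	size = len(n)
-- 	l = []
-- 	flag = 0
-- 	for i in range(0,size):
-- 		l.append(n[i])
-- 	#print (l)
-- 	for i in range(1,size):
-- 		if (l[i]!=l[i-1]):
-- 			count = count +1
-- 			if (l[i-1]=='+'):
-- 				for j in range(0,i):
-- 					l[j]='-'
-- 			else:
-- 				for j in range(0,i):
-- 					l[j]='+'
-- 		if (i==size-1):
-- 			if (l[i]=='-'):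
-- 				count = count+1
-- 				#for j in range(0,i+1):
-- 				#	l[j]='+'
--
-- 	if (size==1):
-- 		if l[0]=='-':
-- 			return 1
-- 	return count
-- ===== SOURCE B (Python) =====
-- def fufu(n):
--     count = sum(1 for a, b in zip(n, n[1:]) if a != b)
--     if n and n[-1] == '-':
--         count += 1
--     return count
-- ===== Notes on version B (the rewrite author's own statement) =====
-- stated objective: faster
-- what changed: A copies the string into a mutable list and, on each transition, rewrites the whole prefix in an inner loop (quadratic); B is one linear pass counting adjacent differing pairs plus a final-minus bonus, with no mutation and no special-casing of length 0/1.
import Mathlib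
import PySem

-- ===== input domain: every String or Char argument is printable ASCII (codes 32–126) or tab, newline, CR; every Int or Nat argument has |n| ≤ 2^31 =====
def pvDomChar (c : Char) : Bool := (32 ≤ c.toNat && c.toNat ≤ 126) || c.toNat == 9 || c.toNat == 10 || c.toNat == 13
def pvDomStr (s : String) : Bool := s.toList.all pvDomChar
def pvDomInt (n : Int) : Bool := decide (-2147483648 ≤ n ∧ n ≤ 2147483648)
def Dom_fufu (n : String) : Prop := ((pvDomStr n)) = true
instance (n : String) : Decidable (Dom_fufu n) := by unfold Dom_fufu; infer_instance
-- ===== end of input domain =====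

-- B replaces A's quadratic loop-with-prefix-rewrites by one linear pass counting adjacent
-- differing pairs plus a final '-' bonus (objective: faster, measured).

-- ===== PORT A =====
-- the body of A's second loop, step for step (state = (count, l))
def fufuStep (size : Int) (st : Int × List Char) (i : Int) : Int × List Char :=
  let st1 : Int × List Char :=
    if PySem.List.pyGetD st.2 i ' ' ≠ PySem.List.pyGetD st.2 (i - 1) ' ' then
      if PySem.List.pyGetD st.2 (i - 1) ' ' = '+' then
        (st.1 + 1, (PySem.List.pyRange 0 i 1).foldl (fun l j => PySem.List.pySetD l j '-') st.2)
      else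
        (st.1 + 1, (PySem.List.pyRange 0 i 1).foldl (fun l j => PySem.List.pySetD l j '+') st.2)
    else st
  if i = size - 1 then
    if PySem.List.pyGetD st1.2 i ' ' = '-' then (st1.1 + 1, st1.2) else st1
  else st1

def fufu (n : String) : Int :=
  let count : Int := 0
  let size : Int := PySem.Str.len n
  let l : List Char :=
    (PySem.List.pyRange 0 size 1).foldl
      (fun l i => l ++ [(PySem.Str.pyGet? n i).getD ' ']) []
  let st := (PySem.List.pyRange 1 size 1).foldl (fufuStep size) (count, l)
  if size = 1 then
    if PySem.List.pyGetD st.2 0 ' ' = '-' then 1 else st.1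
  else st.1

-- ===== PORT B =====
def fufu_alt (n : String) : Int :=
  let cs := n.toList
  let count : Int := ((cs.zip cs.tail).filter (fun p => p.1 ≠ p.2)).length
  if cs ≠ [] ∧ cs.getLast? = some '-' then count + 1 else count

-- ===== PRECONDITION & SPEC =====
def Spec_fufu (n : String) (out : Int) : Prop := out = fufu_alt n
instance (n : String) (out : Int) : Decidable (Spec_fufu n out) := by unfold Spec_fufu; infer_instance

-- ===== CLAIM (what is proved, stated in full; the proofs are below) =====
def Claim_equal_fufu : Prop := ∀ (n : String), Dom_fufu n → Spec_fufu n (fufu n)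

-- ===== LEMMAS AND PROOFS =====

-- number of adjacent differing pairs, as counted by B
def transCount (cs : List Char) : Int :=
  ((cs.zip cs.tail).filter (fun p => p.1 ≠ p.2)).length

lemma transCount_singleton (x : Char) : transCount [x] = 0 := rfl

lemma transCount_cons_cons (x y : Char) (t : List Char) :
    transCount (x :: y :: t) = (if x ≠ y then 1 else 0) + transCount (y :: t) := by
  simp only [transCount, List.tail_cons, List.zip_cons_cons, List.filter_cons]
  split_ifs with h h2 <;> simp_all [Int.add_comm]

-- the prefix rewrite only touches indices below i, so drops from i are preserved
lemma setLoop_drop (c : Char) (i : Int) (l : List Char) (m : Nat) (hm : i ≤ (m : Int)) :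
    ((PySem.List.pyRange 0 i 1).foldl (fun l j => PySem.List.pySetD l j c) l).drop m
      = l.drop m
    ∧ ((PySem.List.pyRange 0 i 1).foldl (fun l j => PySem.List.pySetD l j c) l).length
      = l.length := by
  have aux : ∀ (js : List Int) (l : List Char), (∀ j ∈ js, 0 ≤ j ∧ j < (m : Int)) →
      (js.foldl (fun l j => PySem.List.pySetD l j c) l).drop m = l.drop m
      ∧ (js.foldl (fun l j => PySem.List.pySetD l j c) l).length = l.length := by
    intro js
    induction js with
    | nil => intro l _; exact ⟨rfl, rfl⟩
    | cons j t ih =>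
      intro l hmem
      have hj := hmem j (List.mem_cons_self)
      have h1 : PySem.List.pySetD l j c = l.set j.toNat c :=
        PySem.List.pySetD_of_nonneg l c hj.1
      have hlt : j.toNat < m := by omega
      have := ih (l.set j.toNat c) (fun x hx => hmem x (List.mem_cons_of_mem _ hx))
      refine ⟨?_, ?_⟩
      · simpa [List.foldl_cons, h1, List.drop_set_of_lt hlt] using this.1
      · simpa [List.foldl_cons, h1] using this.2
  exact aux _ l (fun j hj => by
    have := (PySem.List.mem_pyRange_one (a := 0) (b := i) (x := j)).1 hj
    omega)

lemma getElem?_of_drop_eq {α : Type} (l cs : List α) (m k : Nat)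
    (h : l.drop m = cs.drop m) (hk : m ≤ k) : l[k]? = cs[k]? := by
  have he : k = m + (k - m) := by omega
  rw [he, ← List.getElem?_drop, ← List.getElem?_drop, h]

lemma loopA (cs : List Char) (k : Nat) :
    ∀ (a count : Int) (l : List Char),
      1 ≤ a → ((cs.length : Int) - a).toNat = k →
      l.length = cs.length →
      l.drop (a - 1).toNat = cs.drop (a - 1).toNat →
      ((PySem.List.pyRange a (cs.length : Int) 1).foldl (fufuStep (cs.length : Int)) (count, l)).1
        = count + transCount (cs.drop (a - 1).toNat)
          + (if a < (cs.length : Int) ∧ cs.getLast? = some '-' then 1 else 0) := by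
  induction k with
  | zero =>
    intro a count l ha hk hlen hdrop
    have hge : (cs.length : Int) ≤ a := by omega
    rw [PySem.List.pyRange_one_eq_nil hge]
    have h1 : transCount (cs.drop (a.toNat - 1)) = 0 := by
      cases h : cs.drop (a.toNat - 1) with
      | nil => simp [transCount]
      | cons x t =>
        have ht := congrArg List.length h
        simp only [List.length_drop, List.length_cons] at ht
        have : t = [] := by
          cases t with
          | nil => rfl
          | cons y u => simp at ht; omega
        subst this; exact transCount_singleton x
    have h2 : ¬ (a < (cs.length : Int) ∧ cs.getLast? = some '-') :=
      fun h => absurd h.1 (by omega)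
    simp [h1, h2]
  | succ k ih =>
    intro a count l ha hk hlen hdrop
    have hlt : a < (cs.length : Int) := by omega
    have ha0 : 0 ≤ a := by omega
    have han1 : (a - 1).toNat = a.toNat - 1 := by omega
    have h1le : 1 ≤ a.toNat := by omega
    have hanlt : a.toNat < cs.length := by omega
    rw [han1] at hdrop
    obtain ⟨x, hx⟩ : ∃ x, cs[a.toNat - 1]? = some x :=
      ⟨cs[a.toNat - 1]'(by omega), List.getElem?_eq_getElem (by omega)⟩
    obtain ⟨y, hy⟩ : ∃ y, cs[a.toNat]? = some y :=
      ⟨cs[a.toNat]'hanlt, List.getElem?_eq_getElem hanlt⟩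
    -- values A compares are the ORIGINAL characters
    have hgA : PySem.List.pyGetD l a ' ' = y := by
      rw [PySem.List.pyGetD_eq_getElem l ' ' ha0 (by rw [hlen]; exact_mod_cast hlt)]
      have h9 : l[a.toNat]? = some y := by
        rw [getElem?_of_drop_eq l cs (a.toNat - 1) a.toNat hdrop (by omega), hy]
      rw [List.getElem?_eq_getElem (by omega)] at h9
      exact Option.some_inj.mp h9
    have hgA1 : PySem.List.pyGetD l (a - 1) ' ' = x := by
      rw [PySem.List.pyGetD_eq_getElem l ' '
        (by omega) (by rw [hlen]; exact_mod_cast (by omega : a - 1 < (cs.length : Int)))]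
      have h9 : l[(a - 1).toNat]? = some x := by
        rw [han1, getElem?_of_drop_eq l cs (a.toNat - 1) (a.toNat - 1) hdrop (le_refl _), hx]
      rw [List.getElem?_eq_getElem (by omega)] at h9
      exact Option.some_inj.mp h9
    -- decompose the suffix of cs
    have hdrop1 : cs.drop (a.toNat - 1) = x :: cs.drop a.toNat := by
      rw [List.drop_eq_getElem_cons (l := cs) (i := a.toNat - 1) (by omega)]
      have : a.toNat - 1 + 1 = a.toNat := by omega
      rw [this]
      congr 1
      have := List.getElem?_eq_getElem (l := cs) (i := a.toNat - 1) (by omega)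
      rw [hx] at this; exact (Option.some_inj.mp this.symm)
    have hdrop2 : cs.drop a.toNat = y :: cs.drop (a.toNat + 1) := by
      rw [List.drop_eq_getElem_cons (l := cs) (i := a.toNat) hanlt]
      congr 1
      have := List.getElem?_eq_getElem (l := cs) (i := a.toNat) hanlt
      rw [hy] at this; exact (Option.some_inj.mp this.symm)
    -- characterise one step of A's loop
    have hstep : ∃ l', fufuStep (cs.length : Int) (count, l) a =
        (count + (if y ≠ x then 1 else 0)
          + (if a = (cs.length : Int) - 1 ∧ y = '-' then 1 else 0), l')
        ∧ l'.length = cs.length ∧ l'.drop a.toNat = cs.drop a.toNat := by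
      have hdropla : l.drop a.toNat = cs.drop a.toNat := by
        have h := congrArg List.tail hdrop
        simpa [List.tail_drop, show a.toNat - 1 + 1 = a.toNat by omega] using h
      have hgetAt : ∀ L : List Char, L.length = cs.length →
          L.drop a.toNat = cs.drop a.toNat → PySem.List.pyGetD L a ' ' = y := by
        intro L hL hdL
        rw [PySem.List.pyGetD_eq_getElem L ' ' ha0 (by rw [hL]; exact_mod_cast hlt)]
        have h9 : L[a.toNat]? = some y := by
          rw [getElem?_of_drop_eq L cs a.toNat a.toNat hdL (le_refl _), hy]
        rw [List.getElem?_eq_getElem (by omega)] at h9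
        exact Option.some_inj.mp h9
      by_cases hdiff : y = x
      · refine ⟨l, ?_, hlen, hdropla⟩
        have hgx : PySem.List.pyGetD l a ' ' = x := hdiff ▸ hgA
        have hrhs : (count + if y ≠ x then (1 : Int) else 0)
            + (if a = (cs.length : Int) - 1 ∧ y = '-' then (1 : Int) else 0)
            = count + (if a = (cs.length : Int) - 1 ∧ x = '-' then (1 : Int) else 0) := by
          rw [hdiff]; simp
        rw [hrhs]
        simp only [fufuStep]
        rw [if_neg (show ¬ (PySem.List.pyGetD l a ' ' ≠ PySem.List.pyGetD l (a - 1) ' ')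
              from by rw [hgA, hgA1, hdiff]; simp)]
        by_cases hend : a = (cs.length : Int) - 1
        · rw [if_pos hend]
          by_cases hx2 : x = '-'
          · rw [if_pos (show PySem.List.pyGetD (count, l).2 a ' ' = '-' from hgx.trans hx2),
              if_pos ⟨hend, hx2⟩]
          · rw [if_neg (show ¬ PySem.List.pyGetD (count, l).2 a ' ' = '-'
                  from fun h => hx2 (hgx.symm.trans h)),
              if_neg (fun h => hx2 h.2), add_zero]
        · rw [if_neg hend, if_neg (fun h => hend h.1), add_zero]
      · have hone : (if y ≠ x then (1 : Int) else 0) = 1 := if_pos hdiff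
        have hcond : ¬ (PySem.List.pyGetD l a ' ' = PySem.List.pyGetD l (a - 1) ' ') := by
          rw [hgA, hgA1]; exact hdiff
        by_cases hplus : x = '+'
        · obtain ⟨hd1, hl1⟩ := setLoop_drop '-' a l a.toNat (by omega)
          set L := (PySem.List.pyRange 0 a 1).foldl
            (fun l j => PySem.List.pySetD l j '-') l with hLdef
          have hLlen : L.length = cs.length := hl1.trans hlen
          have hLdrop : L.drop a.toNat = cs.drop a.toNat := hd1.trans hdropla
          have hLy := hgetAt L hLlen hLdrop
          refine ⟨L, ?_, hLlen, hLdrop⟩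
          simp only [fufuStep]
          rw [if_pos hcond, if_pos (hgA1.trans hplus), ← hLdef, hone]
          by_cases hend : a = (cs.length : Int) - 1
          · rw [if_pos hend]
            by_cases hy2 : y = '-'
            · rw [if_pos (show PySem.List.pyGetD (count + 1, L).2 a ' ' = '-'
                  from hLy.trans hy2), if_pos ⟨hend, hy2⟩]
            · rw [if_neg (show ¬ PySem.List.pyGetD (count + 1, L).2 a ' ' = '-'
                  from fun h => hy2 (hLy.symm.trans h)),
                if_neg (fun h => hy2 h.2), add_zero]
          · rw [if_neg hend, if_neg (fun h => hend h.1), add_zero]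
        · obtain ⟨hd1, hl1⟩ := setLoop_drop '+' a l a.toNat (by omega)
          set L := (PySem.List.pyRange 0 a 1).foldl
            (fun l j => PySem.List.pySetD l j '+') l with hLdef
          have hLlen : L.length = cs.length := hl1.trans hlen
          have hLdrop : L.drop a.toNat = cs.drop a.toNat := hd1.trans hdropla
          have hLy := hgetAt L hLlen hLdrop
          refine ⟨L, ?_, hLlen, hLdrop⟩
          simp only [fufuStep]
          rw [if_pos hcond, if_neg (show ¬ PySem.List.pyGetD l (a - 1) ' ' = '+'
              from fun h => hplus (hgA1.symm.trans h)), ← hLdef, hone]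
          by_cases hend : a = (cs.length : Int) - 1
          · rw [if_pos hend]
            by_cases hy2 : y = '-'
            · rw [if_pos (show PySem.List.pyGetD (count + 1, L).2 a ' ' = '-'
                  from hLy.trans hy2), if_pos ⟨hend, hy2⟩]
            · rw [if_neg (show ¬ PySem.List.pyGetD (count + 1, L).2 a ' ' = '-'
                  from fun h => hy2 (hLy.symm.trans h)),
                if_neg (fun h => hy2 h.2), add_zero]
          · rw [if_neg hend, if_neg (fun h => hend h.1), add_zero]
    obtain ⟨l', hstepEq, hlen', hdrop'⟩ := hstep
    rw [PySem.List.pyRange_one_cons hlt, List.foldl_cons, hstepEq]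
    have hIH := ih (a + 1) ((count + if y ≠ x then 1 else 0) + if a = (cs.length : Int) - 1 ∧ y = '-' then 1 else 0) l' (by omega) (by omega) hlen'
      (by have : (a + 1 - 1).toNat = a.toNat := by omega
          rw [this]; exact hdrop')
    rw [hIH]
    have hrw : (a + 1 - 1).toNat = a.toNat := by omega
    rw [hrw, han1, hdrop1, hdrop2, transCount_cons_cons, ← hdrop2]
    -- last-element bonus bookkeeping
    have hlast : a = (cs.length : Int) - 1 → cs.getLast? = some y := by
      intro h
      rw [List.getLast?_eq_getElem?]
      have : cs.length - 1 = a.toNat := by omega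
      rw [this, hy]
    have hxy : (if y ≠ x then (1 : Int) else 0) = if x ≠ y then 1 else 0 := by
      by_cases h : x = y <;> simp [h, Ne, eq_comm]
    have hbonus : ((if a = (cs.length : Int) - 1 ∧ y = '-' then (1 : Int) else 0)
        + (if a + 1 < (cs.length : Int) ∧ cs.getLast? = some '-' then 1 else 0))
        = (if a < (cs.length : Int) ∧ cs.getLast? = some '-' then 1 else 0) := by
      by_cases hend : a = (cs.length : Int) - 1
      · have hl := hlast hend
        have h3 : ¬ (a + 1 < (cs.length : Int) ∧ cs.getLast? = some '-') :=
          fun h => absurd h.1 (by omega)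
        by_cases hyd : y = '-'
        · rw [if_pos ⟨hend, hyd⟩, if_neg h3, if_pos ⟨hlt, by rw [hl, hyd]⟩]
          norm_num
        · rw [if_neg (fun h => hyd h.2), if_neg h3,
            if_neg (fun h => hyd (Option.some_inj.mp (hl.symm.trans h.2)))]
          simp
      · have h2 : ¬ (a = (cs.length : Int) - 1 ∧ y = '-') := fun h => hend h.1
        rw [if_neg h2, zero_add]
        by_cases hlast' : cs.getLast? = some '-'
        · rw [if_pos ⟨by omega, hlast'⟩, if_pos ⟨hlt, hlast'⟩]
        · rw [if_neg (fun h => hlast' h.2), if_neg (fun h => hlast' h.2)]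
    rw [hxy] at *
    linarith [hbonus]

-- ===== VERDICT (by name: the statement is the Claim_ definition above) =====
theorem fufu_spec : Claim_equal_fufu := by
  intro n _
  show fufu n = fufu_alt n
  have hcopy : (PySem.List.pyRange 0 ((n.toList.length : Int)) 1).foldl
      (fun l i => l ++ [(PySem.Str.pyGet? n i).getD ' ']) [] = n.toList := by
    rw [PySem.List.foldl_append_singleton_eq_map]
    have hfn : (fun i => (PySem.Str.pyGet? n i).getD ' ')
        = (fun j => PySem.List.pyGetD n.toList j ' ') := rfl
    rw [hfn]
    have h := PySem.List.map_pyGetD_pyRange_zero n.toList ' '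
    rw [PySem.List.len_eq] at h
    simpa using h
  have hloop := loopA n.toList ((n.toList.length : Int) - 1).toNat 1 0 n.toList
    (le_refl 1) rfl rfl rfl
  simp only [fufu, PySem.Str.len_eq, hcopy]
  by_cases h1 : n.toList.length = 1
  · obtain ⟨c, hc⟩ := List.length_eq_one_iff.mp h1
    rw [hc] at hloop ⊢
    simp only [fufu_alt, hc]
    norm_num [PySem.List.pyRange_one_eq_nil, PySem.List.pyGetD_zero_cons]
  · rw [if_neg (by exact_mod_cast h1 : ¬ ((n.toList.length : Int) = (1 : Int)))]
    rw [hloop]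
    simp only [fufu_alt]
    have hz : ((1 : Int) - 1).toNat = 0 := rfl
    rw [hz, List.drop_zero, zero_add]
    have hiff : ((1 : Int) < (n.toList.length : Int) ∧ n.toList.getLast? = some '-')
        ↔ (n.toList ≠ [] ∧ n.toList.getLast? = some '-') := by
      constructor
      · rintro ⟨h, h2⟩
        refine ⟨?_, h2⟩
        intro he
        rw [he] at h
        simp at h
      · rintro ⟨h, h2⟩
        have h0 : 0 < n.toList.length := List.length_pos_iff.mpr h
        exact ⟨by omega, h2⟩
    rw [if_congr hiff rfl rfl]
    split_ifs with hcond
    · show transCount n.toList + 1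
        = (((n.toList.zip n.toList.tail).filter (fun p => p.1 ≠ p.2)).length : Int) + 1
      rfl
    · rfl
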